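-- pv_equiv track=rewrite | github.com/alex-lebedev/med-EVE | backend/core/context_selector.py | _rule_based_signals
-- ===== SOURCE A (Python) =====
-- def _rule_based_signals(abnormal_markers):
--     """Rule-based pattern IDs (fallback when subgraph-derived signals are empty)."""
--     signals = []
--     if any(m in abnormal_markers for m in ['Ferritin', 'Iron', 'TSAT', 'Hb']):
--         signals.append("p_iron_def")
--     if any(m in abnormal_markers for m in ['TSH', 'FT4', 'FT3']):
--         signals.append("p_hypothyroid")
--     if 'hsCRP' in abnormal_markers:
--         signals.append("p_inflam_iron_seq")
--     if 'ANC' in abnormal_markers: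
--         signals.append("p_inflam_iron_seq")
--     return signals
-- ===== SOURCE B (Python) =====
-- # Inverted index: single pass over the input, marker -> rule id; then emit ids in rule order.
-- _PATTERN_OF = {
--     'Ferritin': 0, 'Iron': 0, 'TSAT': 0, 'Hb': 0,
--     'TSH': 1, 'FT4': 1, 'FT3': 1,
--     'hsCRP': 2, 'ANC': 3,
-- }
-- _IDS = ['p_iron_def', 'p_hypothyroid', 'p_inflam_iron_seq', 'p_inflam_iron_seq']
--
-- def _rule_based_signals(abnormal_markers):
--     fired = set()
--     for m in abnormal_markers:
--         r = _PATTERN_OF.get(m)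
--         if r is not None:
--             fired.add(r)
--     return [pid for r, pid in enumerate(_IDS) if r in fired]
-- ===== Notes on version B (the rewrite author's own statement) =====
-- stated objective: alternative
-- what changed: Replaces A's four per-rule scans of the input by an inverted index (marker -> rule id): one pass over abnormal_markers collects the set of fired rule ids via dict lookup, then pattern ids are emitted in fixed rule order; the duplicate p_inflam_iron_seq entries are two distinct rule ids.
import Mathlib
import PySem

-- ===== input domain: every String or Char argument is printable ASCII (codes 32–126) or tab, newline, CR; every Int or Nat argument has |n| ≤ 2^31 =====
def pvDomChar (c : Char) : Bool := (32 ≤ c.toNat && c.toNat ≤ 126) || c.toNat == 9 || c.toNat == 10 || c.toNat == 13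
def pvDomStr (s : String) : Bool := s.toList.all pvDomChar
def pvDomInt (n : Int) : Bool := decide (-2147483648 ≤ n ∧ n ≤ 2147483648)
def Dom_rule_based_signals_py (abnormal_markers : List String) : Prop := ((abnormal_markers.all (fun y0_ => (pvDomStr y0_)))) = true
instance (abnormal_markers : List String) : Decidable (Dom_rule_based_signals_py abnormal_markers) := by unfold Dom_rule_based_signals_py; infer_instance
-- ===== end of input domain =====

-- ===== PORT A =====
-- B replaces A's four per-rule scans of the input by an inverted marker->rule index traversed in one pass over the input.
def rule_based_signals_py (abnormal_markers : List String) : List String :=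
  let signals : List String := []
  let signals := if ["Ferritin", "Iron", "TSAT", "Hb"].any (fun m => abnormal_markers.contains m)
                 then signals ++ ["p_iron_def"] else signals
  let signals := if ["TSH", "FT4", "FT3"].any (fun m => abnormal_markers.contains m)
                 then signals ++ ["p_hypothyroid"] else signals
  let signals := if abnormal_markers.contains "hsCRP"
                 then signals ++ ["p_inflam_iron_seq"] else signals
  let signals := if abnormal_markers.contains "ANC"
                 then signals ++ ["p_inflam_iron_seq"] else signals
  signals

-- ===== PORT B =====
def pvPatternOf : PySem.Dict String Int :=
  PySem.Dict.ofList
    [("Ferritin", 0), ("Iron", 0), ("TSAT", 0), ("Hb", 0),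
     ("TSH", 1), ("FT4", 1), ("FT3", 1),
     ("hsCRP", 2), ("ANC", 3)]

def pvIds : List String :=
  ["p_iron_def", "p_hypothyroid", "p_inflam_iron_seq", "p_inflam_iron_seq"]

def rule_based_signals_py_alt (abnormal_markers : List String) : List String :=
  let fired : PySem.Set Int :=
    abnormal_markers.foldl
      (fun fired m =>
        match PySem.Dict.get? pvPatternOf m with
        | some r => PySem.Set.add fired r
        | none => fired)
      PySem.Set.empty
  ((PySem.List.enumerate pvIds).filter (fun p => PySem.Set.contains fired p.1)).map (fun p => p.2)

-- ===== PRECONDITION & SPEC =====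
def Spec_rule_based_signals_py (abnormal_markers : List String) (out : List String) : Prop := out = rule_based_signals_py_alt abnormal_markers
instance (abnormal_markers : List String) (out : List String) : Decidable (Spec_rule_based_signals_py abnormal_markers out) := by unfold Spec_rule_based_signals_py; infer_instance

-- ===== CLAIM (what is proved, stated in full; the proofs are below) =====
def Claim_equal_rule_based_signals_py : Prop := ∀ (abnormal_markers : List String), Dom_rule_based_signals_py abnormal_markers → Spec_rule_based_signals_py abnormal_markers (rule_based_signals_py abnormal_markers)

-- ===== LEMMAS AND PROOFS =====

theorem get?_pvPatternOf (m : String) : PySem.Dict.get? pvPatternOf m =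
    (if m = "Ferritin" ∨ m = "Iron" ∨ m = "TSAT" ∨ m = "Hb" then some 0
     else if m = "TSH" ∨ m = "FT4" ∨ m = "FT3" then some 1
     else if m = "hsCRP" then some 2
     else if m = "ANC" then some 3 else none) := by
  have hitems : pvPatternOf.items =
      [("Ferritin", 0), ("Iron", 0), ("TSAT", 0), ("Hb", 0),
       ("TSH", 1), ("FT4", 1), ("FT3", 1), ("hsCRP", 2), ("ANC", 3)] := by decide
  simp only [PySem.Dict.get?, hitems]
  split_ifs with h0 h1 h2 h3
  · rcases h0 with h|h|h|h <;> subst h <;> rfl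
  · rcases h1 with h|h|h <;> subst h <;> rfl
  · subst h2; rfl
  · subst h3; rfl
  · have a1 : ¬m = "Ferritin" := fun h => h0 (Or.inl h)
    have a2 : ¬m = "Iron" := fun h => h0 (Or.inr (Or.inl h))
    have a3 : ¬m = "TSAT" := fun h => h0 (Or.inr (Or.inr (Or.inl h)))
    have a4 : ¬m = "Hb" := fun h => h0 (Or.inr (Or.inr (Or.inr h)))
    have b1 : ¬m = "TSH" := fun h => h1 (Or.inl h)
    have b2 : ¬m = "FT4" := fun h => h1 (Or.inr (Or.inl h))
    have b3 : ¬m = "FT3" := fun h => h1 (Or.inr (Or.inr h))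
    simp [List.find?, beq_eq_false_iff_ne.mpr (Ne.symm a1), beq_eq_false_iff_ne.mpr (Ne.symm a2),
      beq_eq_false_iff_ne.mpr (Ne.symm a3), beq_eq_false_iff_ne.mpr (Ne.symm a4),
      beq_eq_false_iff_ne.mpr (Ne.symm b1), beq_eq_false_iff_ne.mpr (Ne.symm b2),
      beq_eq_false_iff_ne.mpr (Ne.symm b3), beq_eq_false_iff_ne.mpr (Ne.symm h2),
      beq_eq_false_iff_ne.mpr (Ne.symm h3)]

theorem mem_pvFold (am : List String) (s : PySem.Set Int) (r : Int) :
    r ∈ am.foldl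
      (fun fired m =>
        match PySem.Dict.get? pvPatternOf m with
        | some i => PySem.Set.add fired i
        | none => fired) s ↔
    r ∈ s ∨ ∃ m ∈ am, PySem.Dict.get? pvPatternOf m = some r := by
  induction am generalizing s with
  | nil => simp
  | cons a t ih =>
    simp only [List.foldl_cons, List.mem_cons]
    rw [ih]
    cases h : PySem.Dict.get? pvPatternOf a <;>
      simp [h, PySem.Set.mem_add, eq_comm] <;> aesop

theorem get?_eq_some_zero (m : String) :
    PySem.Dict.get? pvPatternOf m = some 0 ↔
      m = "Ferritin" ∨ m = "Iron" ∨ m = "TSAT" ∨ m = "Hb" := by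
  rw [get?_pvPatternOf]; split_ifs with h0 h1 h2 h3 <;> simp_all <;>
    first
      | (rcases h0 with h|h|h|h <;> subst h <;> decide)
      | (rcases h1 with h|h|h <;> subst h <;> decide)
      | (subst h2; decide) | (subst h3; decide)

theorem get?_eq_some_one (m : String) :
    PySem.Dict.get? pvPatternOf m = some 1 ↔ m = "TSH" ∨ m = "FT4" ∨ m = "FT3" := by
  rw [get?_pvPatternOf]; split_ifs with h0 h1 h2 h3 <;> simp_all <;>
    first
      | (rcases h0 with h|h|h|h <;> subst h <;> decide)
      | (rcases h1 with h|h|h <;> subst h <;> decide)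
      | (subst h2; decide) | (subst h3; decide)

theorem get?_eq_some_two (m : String) :
    PySem.Dict.get? pvPatternOf m = some 2 ↔ m = "hsCRP" := by
  rw [get?_pvPatternOf]; split_ifs with h0 h1 h2 h3 <;> simp_all <;>
    first
      | (rcases h0 with h|h|h|h <;> subst h <;> decide)
      | (rcases h1 with h|h|h <;> subst h <;> decide)
      | (subst h2; decide) | (subst h3; decide)

theorem get?_eq_some_three (m : String) :
    PySem.Dict.get? pvPatternOf m = some 3 ↔ m = "ANC" := by
  rw [get?_pvPatternOf]; split_ifs with h0 h1 h2 h3 <;> simp_all <;>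
    first
      | (rcases h0 with h|h|h|h <;> subst h <;> decide)
      | (rcases h1 with h|h|h <;> subst h <;> decide)
      | (subst h2; decide) | (subst h3; decide)

theorem ex_four (am : List String) :
    (∃ m ∈ am, m = "Ferritin" ∨ m = "Iron" ∨ m = "TSAT" ∨ m = "Hb") ↔
      ("Ferritin" ∈ am ∨ "Iron" ∈ am ∨ "TSAT" ∈ am ∨ "Hb" ∈ am) := by
  constructor
  · rintro ⟨m, hm, h | h | h | h⟩ <;> subst h <;> tauto
  · rintro (h | h | h | h) <;> exact ⟨_, h, by tauto⟩

theorem ex_three (am : List String) :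
    (∃ m ∈ am, m = "TSH" ∨ m = "FT4" ∨ m = "FT3") ↔
      ("TSH" ∈ am ∨ "FT4" ∈ am ∨ "FT3" ∈ am) := by
  constructor
  · rintro ⟨m, hm, h | h | h⟩ <;> subst h <;> tauto
  · rintro (h | h | h) <;> exact ⟨_, h, by tauto⟩

-- ===== VERDICT (by name: the statement is the Claim_ definition above) =====
theorem rule_based_signals_py_spec : Claim_equal_rule_based_signals_py := by
  intro am _
  unfold Spec_rule_based_signals_py
  unfold rule_based_signals_py rule_based_signals_py_alt
  simp only [pvIds, PySem.List.enumerate_cons, PySem.List.enumerate_nil, List.filter_cons,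
    List.filter_nil]
  norm_num
  simp only [mem_pvFold, List.not_mem_nil, false_or, get?_eq_some_zero, get?_eq_some_one,
    get?_eq_some_two, get?_eq_some_three, ex_four, ex_three, exists_eq_right]
  split_ifs <;> rfl
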